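-- pv_equiv track=rewrite | github.com/yuxiaous/adventofcode | 2021/day25.py | part1
-- ===== SOURCE A (Python) =====
-- def part1(input):
--     height = len(input)
--     width = len(input[0])
--
--     # make situation map
--     situation_map = {}
--     for y in range(height):
--         for x in range(width):
--             what = input[y][x]
--             if what in ['>', 'v']:
--                 situation_map[(x, y)] = what
--
--     step = 0
--     last_situation_map = {}
--     while situation_map != last_situation_map:
--         last_situation_map = situation_map
--
--         # the east-facing herd moves
--         temp_situation_map = {}
--         for location, seacucumber in last_situation_map.items():
--             if seacucumber == '>':
--                 x, y = location
--                 x += 1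
--                 if x >= width:
--                     x -= width
--                 if (x, y) not in last_situation_map:
--                     temp_situation_map[(x, y)] = seacucumber
--                     continue
--             temp_situation_map[location] = seacucumber
--
--         # the south-facing herd moves
--         situation_map = {}
--         for location, seacucumber in temp_situation_map.items():
--             if seacucumber == 'v':
--                 x, y = location
--                 y += 1
--                 if y >= height:
--                     y -= height
--                 if (x, y) not in temp_situation_map:
--                     situation_map[(x, y)] = seacucumber
--                     continue
--             situation_map[location] = seacucumber
--
--         step += 1
--     return step
-- ===== SOURCE B (Python) =====
-- def part1(input):
--     height = len(input)
--     width = len(input[0])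
--
--     def norm(c):
--         return c if c in ('>', 'v') else '.'
--
--     grid = [[norm(input[y][x]) for x in range(width)] for y in range(height)]
--
--     def east(g):
--         def cell(y, x):
--             c = g[y][x]
--             if c == '>' and g[y][(x + 1) % width] == '.':
--                 return '.'
--             if c == '.' and g[y][(x - 1) % width] == '>':
--                 return '>'
--             return c
--         return [[cell(y, x) for x in range(width)] for y in range(height)]
--
--     def south(g):
--         def cell(y, x):
--             c = g[y][x]
--             if c == 'v' and g[(y + 1) % height][x] == '.':
--                 return '.'
--             if c == '.' and g[(y - 1) % height][x] == 'v':
--                 return 'v'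
--             return c
--         return [[cell(y, x) for x in range(width)] for y in range(height)]
--
--     step = 0
--     prev = [['.'] * width for _ in range(height)]
--     while grid != prev:
--         prev = grid
--         grid = south(east(grid))
--         step += 1
--     return step
-- ===== Notes on version B (the rewrite author's own statement) =====
-- stated objective: idiomatic
-- what changed: A simulates on a sparse dict of occupied coordinates, scattering each cucumber into a freshly built dict and comparing dicts; B rebuilds a dense h-by-w grid each step with a purely local per-cell gather rule (a cell empties if its mover's target is free, fills if the cell behind holds a mover) and stops when the grid is unchanged. Pre_ excludes exactly the inputs where A raises IndexError: the empty list and inputs with a row shorter than the first row.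
import Mathlib
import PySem

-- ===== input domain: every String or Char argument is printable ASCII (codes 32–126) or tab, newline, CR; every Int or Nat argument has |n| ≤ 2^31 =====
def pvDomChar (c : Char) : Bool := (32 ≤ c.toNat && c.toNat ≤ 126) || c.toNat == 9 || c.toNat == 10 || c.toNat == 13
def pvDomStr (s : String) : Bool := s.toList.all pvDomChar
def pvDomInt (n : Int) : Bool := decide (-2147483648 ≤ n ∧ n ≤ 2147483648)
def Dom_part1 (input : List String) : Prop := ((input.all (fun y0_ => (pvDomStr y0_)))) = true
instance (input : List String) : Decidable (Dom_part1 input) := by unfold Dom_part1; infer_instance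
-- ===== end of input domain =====

-- B replaces A's sparse dict-of-cucumbers scatter simulation by a dense grid recomputed each step
-- with a local gather rule per cell (objective: idiomatic/alternative; same exact step count).

-- ===== PORT A =====
-- A's state: dict (x, y) -> '>' | 'v'.  Python's `dict ==` ignores insertion order, so the
-- while-condition is ported as content equality (dictEqA), not `=` on PySem.Dict.
abbrev Dct := PySem.Dict (Int × Int) Char

def dictEqA (d e : Dct) : Bool :=
  d.items.all (fun p => e.get? p.1 == some p.2) && e.items.all (fun p => d.get? p.1 == some p.2)

-- one item of the east-herd loop body (`for location, seacucumber in last.items(): …`)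
def stepEast (width : Int) (last t : Dct) (p : (Int × Int) × Char) : Dct :=
  if p.2 = '>' then
    let x := p.1.1 + 1
    let x := if x ≥ width then x - width else x
    if last.contains (x, p.1.2) = false then t.insert (x, p.1.2) p.2
    else t.insert p.1 p.2
  else t.insert p.1 p.2

-- one item of the south-herd loop body
def stepSouth (height : Int) (temp t : Dct) (p : (Int × Int) × Char) : Dct :=
  if p.2 = 'v' then
    let y := p.1.2 + 1
    let y := if y ≥ height then y - height else y
    if temp.contains (p.1.1, y) = false then t.insert (p.1.1, y) p.2
    else t.insert p.1 p.2
  else t.insert p.1 p.2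

-- A's `while situation_map != last_situation_map` loop, with fuel: the state space has at most
-- 3^(h·w) dict states, so whenever the Python loop terminates it does so within 3^(h·w) iterations
-- and the fuel 3^(h·w)+1 is never exhausted (on a diverging input the Python never returns and
-- nothing is claimed).
def loopA (height width : Int) : Nat → Int → Dct → Dct → Int
  | 0, step, _, _ => step
  | fuel + 1, step, sm, last =>
    if dictEqA sm last then step
    else
      let temp := sm.items.foldl (stepEast width sm) PySem.Dict.empty
      let sm' := temp.items.foldl (stepSouth height temp) PySem.Dict.empty
      loopA height width fuel (step + 1) sm' sm

-- input[y][x]; the default is only reached outside Pre_ (where Python raises IndexError)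
def chA (input : List String) (y x : Int) : Char :=
  ((PySem.List.pyGet? input y).bind (fun s => PySem.Str.pyGet? s x)).getD ' '

def part1 (input : List String) : Int :=
  let height : Int := input.length
  let width : Int := PySem.Str.len ((PySem.List.pyGet? input 0).getD "")  -- input[0]; [] raises: outside Pre_
  let sm : Dct :=
    (PySem.List.pyRange 0 height 1).foldl (fun d y =>
      (PySem.List.pyRange 0 width 1).foldl (fun d x =>
        let what := chA input y x
        if what = '>' ∨ what = 'v' then d.insert (x, y) what else d) d)
      PySem.Dict.empty
  loopA height width (3 ^ (height.toNat * width.toNat) + 1) 0 sm PySem.Dict.empty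

-- ===== PORT B =====
-- B's state: a dense h×w grid of '.'/'>'/'v'; each phase builds the next grid by a per-cell
-- gather rule (leave if mover with free target, arrive if empty with a mover behind).
def cellB (input : List String) (y x : Nat) : Char :=
  let c := (PySem.Str.pyGet? (input.getD y "") ((x : Nat) : Int)).getD ' '  -- input[y][x]; in range under Pre_
  if c = '>' ∨ c = 'v' then c else '.'

def table (h w : Nat) (f : Nat → Nat → Char) : List (List Char) :=
  (List.range h).map (fun y => (List.range w).map (f y))

def at2 (g : List (List Char)) (y x : Nat) : Char := (g.getD y []).getD x '.'

def eastG (h w : Nat) (g : List (List Char)) : List (List Char) :=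
  table h w (fun y x =>
    let c := at2 g y x
    if c = '>' ∧ at2 g y ((x + 1) % w) = '.' then '.'
    else if c = '.' ∧ at2 g y ((x + w - 1) % w) = '>' then '>'  -- (x-1)%w in Python; equal for 0 ≤ x < w
    else c)

def southG (h w : Nat) (g : List (List Char)) : List (List Char) :=
  table h w (fun y x =>
    let c := at2 g y x
    if c = 'v' ∧ at2 g ((y + 1) % h) x = '.' then '.'
    else if c = '.' ∧ at2 g ((y + h - 1) % h) x = 'v' then 'v'  -- (y-1)%h in Python
    else c)

-- B's `while grid != prev` loop, fueled exactly like loopA (≤ 3^(h·w) grid states).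
def loopB (h w : Nat) : Nat → Int → List (List Char) → List (List Char) → Int
  | 0, step, _, _ => step
  | fuel + 1, step, g, prev =>
    if g = prev then step
    else loopB h w fuel (step + 1) (southG h w (eastG h w g)) g

def part1_alt (input : List String) : Int :=
  let h := input.length
  let w := (PySem.Str.len (input.headD "")).toNat  -- len(input[0]); [] raises: outside Pre_
  let grid := table h w (cellB input)
  loopB h w (3 ^ (h * w) + 1) 0 grid (table h w (fun _ _ => '.'))

-- ===== PRECONDITION & SPEC =====
-- Pre_ excludes exactly the inputs where A raises IndexError: the empty list (input[0]) and
-- inputs whose some row is shorter than the first row (input[y][x] for x < len(input[0])).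
def Pre_part1 (input : List String) : Prop :=
  input ≠ [] ∧ ∀ s ∈ input, PySem.Str.len (input.headD "") ≤ PySem.Str.len s
instance (input : List String) : Decidable (Pre_part1 input) := by unfold Pre_part1; infer_instance

def pvWitness_part1 : List String := [">>v>", "v>.>", ">>.v"]

def Spec_part1 (input : List String) (out : Int) : Prop := out = part1_alt input
instance (input : List String) (out : Int) : Decidable (Spec_part1 input out) := by unfold Spec_part1; infer_instance

-- ===== CLAIM (what is proved, stated in full; the proofs are below) =====
def Claim_equal_part1 : Prop := ∀ (input : List String), Dom_part1 input → Pre_part1 input → Spec_part1 input (part1 input)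

-- ===== LEMMAS AND PROOFS =====

-- ---------- basic dict facts ----------
lemma keys_eq_map (d : Dct) : d.keys = d.items.map (·.1) := rfl

lemma items_nodup (d : Dct) (h : d.keys.Nodup) : d.items.Nodup := by
  rw [keys_eq_map] at h; exact h.of_map

lemma key_inj {d : Dct} (hnd : d.keys.Nodup) {p q : (Int × Int) × Char}
    (hp : p ∈ d.items) (hq : q ∈ d.items) (h : p.1 = q.1) : p = q := by
  have h1 : d.get? p.1 = some p.2 := PySem.Dict.get?_of_mem_items _ hp hnd
  have h2 : d.get? q.1 = some q.2 := PySem.Dict.get?_of_mem_items _ hq hnd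
  rw [h] at h1
  rw [h1] at h2
  exact Prod.ext h (Option.some.inj h2)

def InBox (w h : Int) (k : Int × Int) : Prop := 0 ≤ k.1 ∧ k.1 < w ∧ 0 ≤ k.2 ∧ k.2 < h

def DInv (w h : Int) (d : Dct) : Prop :=
  d.keys.Nodup ∧ ∀ p ∈ d.items, InBox w h p.1 ∧ (p.2 = '>' ∨ p.2 = 'v')

lemma contains_false_iff_get? (d : Dct) (k : Int × Int) :
    d.contains k = false ↔ d.get? k = none := by
  rw [PySem.Dict.contains_eq_isSome_get?]; cases d.get? k <;> simp

lemma get?_none_of_not_box {w h : Int} {d : Dct} (hinv : DInv w h d) {k : Int × Int}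
    (hk : ¬ InBox w h k) : d.get? k = none := by
  cases hq : d.get? k with
  | none => rfl
  | some v =>
    exact absurd ((hinv.2 _ (PySem.Dict.mem_items_of_get?_eq_some _ hq)).1) hk

lemma getD_dot_iff {w h : Int} {d : Dct} (hinv : DInv w h d) (k : Int × Int) :
    d.getD k '.' = '.' ↔ d.get? k = none := by
  rw [PySem.Dict.getD_eq_get?_getD]
  cases hq : d.get? k with
  | none => simp
  | some v =>
    have hv2 : v = '>' ∨ v = 'v' := (hinv.2 _ (PySem.Dict.mem_items_of_get?_eq_some _ hq)).2
    simp only [Option.getD_some]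
    constructor
    · intro hdot
      exfalso
      rcases hv2 with h' | h' <;> rw [h'] at hdot <;> exact absurd hdot (by decide)
    · intro hcontra; cases hcontra

lemma getD_eq_iff_get? {d : Dct} {k : Int × Int} {c : Char} (hc : c ≠ '.') :
    d.getD k '.' = c ↔ d.get? k = some c := by
  rw [PySem.Dict.getD_eq_get?_getD]
  cases d.get? k with
  | none => simpa using fun h => (hc h.symm).elim
  | some v => simp

-- ---------- generic one-herd phase over the dict ----------
def gtgt (m : Char) (mv : Int × Int → Int × Int) (d : Dct) (p : (Int × Int) × Char) : Int × Int :=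
  if p.2 = m ∧ d.contains (mv p.1) = false then mv p.1 else p.1

def gphase (m : Char) (mv : Int × Int → Int × Int) (d : Dct) : Dct :=
  d.items.foldl (fun t p => t.insert (gtgt m mv d p) p.2) PySem.Dict.empty

lemma gtgt_map_nodup {w h : Int} (m : Char) (mv mi : Int × Int → Int × Int) (d : Dct)
    (hinv : DInv w h d) (Hmi : ∀ k, InBox w h k → mi (mv k) = k) :
    (d.items.map (gtgt m mv d)).Nodup := by
  refine List.Nodup.map_on ?_ (items_nodup d hinv.1)
  intro p hp q hq hpq
  have hpk : InBox w h p.1 := (hinv.2 p hp).1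
  have hqk : InBox w h q.1 := (hinv.2 q hq).1
  have hqkeys : d.contains q.1 = true := by
    rw [PySem.Dict.contains_iff_mem_keys]; exact PySem.Dict.mem_keys_of_mem_items _ hq
  have hpkeys : d.contains p.1 = true := by
    rw [PySem.Dict.contains_iff_mem_keys]; exact PySem.Dict.mem_keys_of_mem_items _ hp
  unfold gtgt at hpq
  split_ifs at hpq with h1 h2 h2
  · refine key_inj hinv.1 hp hq ?_
    rw [← Hmi p.1 hpk, ← Hmi q.1 hqk, hpq]
  · exfalso; rw [hpq] at h1; rw [h1.2] at hqkeys; cases hqkeys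
  · exfalso; rw [← hpq] at h2; rw [h2.2] at hpkeys; cases hpkeys
  · exact key_inj hinv.1 hp hq hpq

lemma gphase_items {w h : Int} (m : Char) (mv mi : Int × Int → Int × Int) (d : Dct)
    (hinv : DInv w h d) (Hmi : ∀ k, InBox w h k → mi (mv k) = k) :
    (gphase m mv d).items = d.items.map (fun p => (gtgt m mv d p, p.2)) := by
  have hfresh : ∀ p ∈ d.items, (PySem.Dict.empty : Dct).contains (gtgt m mv d p) = false := by
    intro p _; simp [PySem.Dict.contains_empty]
  have hnd := gtgt_map_nodup (w := w) (h := h) m mv mi d hinv Hmi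
  have := PySem.Dict.items_foldl_insert_fresh (l := d.items) (k := gtgt m mv d)
    (v := fun p => p.2) (d := PySem.Dict.empty) hfresh hnd
  simpa [gphase] using this

lemma gphase_keys_nodup {w h : Int} (m : Char) (mv mi : Int × Int → Int × Int) (d : Dct)
    (hinv : DInv w h d) (Hmi : ∀ k, InBox w h k → mi (mv k) = k) :
    (gphase m mv d).keys.Nodup := by
  rw [keys_eq_map, gphase_items (w := w) (h := h) m mv mi d hinv Hmi, List.map_map]
  exact gtgt_map_nodup (w := w) (h := h) m mv mi d hinv Hmi

lemma gphase_inv {w h : Int} (m : Char) (mv mi : Int × Int → Int × Int) (d : Dct)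
    (hinv : DInv w h d) (Hbox : ∀ k, InBox w h k → InBox w h (mv k))
    (Hmi : ∀ k, InBox w h k → mi (mv k) = k) :
    DInv w h (gphase m mv d) := by
  refine ⟨gphase_keys_nodup (w := w) (h := h) m mv mi d hinv Hmi, ?_⟩
  intro p hp
  rw [gphase_items (w := w) (h := h) m mv mi d hinv Hmi] at hp
  obtain ⟨q, hq, rfl⟩ := List.mem_map.1 hp
  refine ⟨?_, (hinv.2 q hq).2⟩
  unfold gtgt
  split_ifs
  · exact Hbox _ (hinv.2 q hq).1
  · exact (hinv.2 q hq).1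

lemma gphase_get? {w h : Int} (m : Char) (mv mi : Int × Int → Int × Int) (d : Dct)
    (hinv : DInv w h d)
    (Hbox : ∀ k, InBox w h k → InBox w h (mv k))
    (Hibox : ∀ k, InBox w h k → InBox w h (mi k))
    (Hmi : ∀ k, InBox w h k → mi (mv k) = k)
    (Hmv : ∀ k, InBox w h k → mv (mi k) = k)
    (k : Int × Int) (hk : InBox w h k) :
    (gphase m mv d).get? k =
      if d.get? k = some m ∧ d.contains (mv k) = false then none
      else if d.get? k = none ∧ d.get? (mi k) = some m then some m
      else d.get? k := by
  have hitems := gphase_items (w := w) (h := h) m mv mi d hinv Hmi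
  have hknd := gphase_keys_nodup (w := w) (h := h) m mv mi d hinv Hmi
  split_ifs with h1 h2
  · -- the mover at k leaves and nothing arrives
    cases hc : (gphase m mv d).get? k with
    | none => rfl
    | some v =>
      exfalso
      have hmem := PySem.Dict.mem_items_of_get?_eq_some _ hc
      rw [hitems] at hmem
      obtain ⟨q, hq, hqe⟩ := List.mem_map.1 hmem
      have hqk : gtgt m mv d q = k := congrArg Prod.fst hqe
      have hkc : d.contains k = true := by
        rw [PySem.Dict.contains_eq_isSome_get?, h1.1]; rfl
      unfold gtgt at hqk
      split_ifs at hqk with hc1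
      · rw [hqk] at hc1; rw [hc1.2] at hkc; cases hkc
      · have hg : d.get? q.1 = some q.2 := PySem.Dict.get?_of_mem_items _ hq hinv.1
        rw [hqk, h1.1] at hg
        exact hc1 ⟨(Option.some.inj hg).symm, by rw [hqk]; exact h1.2⟩
  · -- a mover arrives from mi k
    have hmem : ((mi k, m) : (Int × Int) × Char) ∈ d.items :=
      PySem.Dict.mem_items_of_get?_eq_some _ h2.2
    have hcf : d.contains (mv (mi k)) = false := by
      rw [Hmv k hk, contains_false_iff_get? d k]; exact h2.1
    have htgt : gtgt m mv d (mi k, m) = k := by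
      unfold gtgt
      rw [if_pos ⟨rfl, hcf⟩, Hmv k hk]
    have hmem2 : (gtgt m mv d (mi k, m), m) ∈ (gphase m mv d).items := by
      rw [hitems]
      exact List.mem_map_of_mem hmem
    rw [htgt] at hmem2
    exact PySem.Dict.get?_of_mem_items _ hmem2 hknd
  · -- unchanged
    cases hc : d.get? k with
    | some v =>
      have hmem : ((k, v) : (Int × Int) × Char) ∈ d.items :=
        PySem.Dict.mem_items_of_get?_eq_some _ hc
      have htgt : gtgt m mv d (k, v) = k := by
        unfold gtgt
        split_ifs with hc1
        · exact absurd ⟨by rw [hc]; exact congrArg some hc1.1, hc1.2⟩ h1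
        · rfl
      have hmem2 : (gtgt m mv d (k, v), v) ∈ (gphase m mv d).items := by
        rw [hitems]
        exact List.mem_map_of_mem hmem
      rw [htgt] at hmem2
      exact PySem.Dict.get?_of_mem_items _ hmem2 hknd
    | none =>
      cases hc2 : (gphase m mv d).get? k with
      | none => rfl
      | some v =>
        exfalso
        have hmem := PySem.Dict.mem_items_of_get?_eq_some _ hc2
        rw [hitems] at hmem
        obtain ⟨q, hq, hqe⟩ := List.mem_map.1 hmem
        have hqk : gtgt m mv d q = k := congrArg Prod.fst hqe
        have hqget : d.get? q.1 = some q.2 := PySem.Dict.get?_of_mem_items _ hq hinv.1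
        unfold gtgt at hqk
        split_ifs at hqk with hc1
        · have hq1 : q.1 = mi k := by rw [← hqk, Hmi q.1 (hinv.2 q hq).1]
          refine h2 ⟨hc, ?_⟩
          rw [← hq1, hqget, hc1.1]
        · rw [hqk, hc] at hqget; cases hqget

lemma gphase_getD {w h : Int} (m : Char) (mv mi : Int × Int → Int × Int) (d : Dct)
    (hinv : DInv w h d) (hm : m ≠ '.')
    (Hbox : ∀ k, InBox w h k → InBox w h (mv k))
    (Hibox : ∀ k, InBox w h k → InBox w h (mi k))
    (Hmi : ∀ k, InBox w h k → mi (mv k) = k)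
    (Hmv : ∀ k, InBox w h k → mv (mi k) = k)
    (k : Int × Int) (hk : InBox w h k) :
    (gphase m mv d).getD k '.' =
      if d.getD k '.' = m ∧ d.getD (mv k) '.' = '.' then '.'
      else if d.getD k '.' = '.' ∧ d.getD (mi k) '.' = m then m
      else d.getD k '.' := by
  have hmain := gphase_get? (w := w) (h := h) m mv mi d hinv Hbox Hibox Hmi Hmv k hk
  have e1 : (d.getD k '.' = m) ↔ (d.get? k = some m) := getD_eq_iff_get? hm
  have e2 : (d.getD (mv k) '.' = '.') ↔ (d.contains (mv k) = false) := by
    rw [getD_dot_iff hinv, contains_false_iff_get?]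
  have e3 : (d.getD k '.' = '.') ↔ (d.get? k = none) := getD_dot_iff hinv k
  have e4 : (d.getD (mi k) '.' = m) ↔ (d.get? (mi k) = some m) := getD_eq_iff_get? hm
  rw [PySem.Dict.getD_eq_get?_getD, hmain]
  simp only [e1, e2, e3, e4]
  split_ifs <;> rfl

-- ---------- the two wrap maps and their inverses ----------
def wrapE (width : Int) (k : Int × Int) : Int × Int :=
  (if k.1 + 1 ≥ width then k.1 + 1 - width else k.1 + 1, k.2)
def wrapW (width : Int) (k : Int × Int) : Int × Int :=
  (if k.1 = 0 then width - 1 else k.1 - 1, k.2)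
def wrapS (height : Int) (k : Int × Int) : Int × Int :=
  (k.1, if k.2 + 1 ≥ height then k.2 + 1 - height else k.2 + 1)
def wrapN (height : Int) (k : Int × Int) : Int × Int :=
  (k.1, if k.2 = 0 then height - 1 else k.2 - 1)

lemma wrapE_box (w h : Int) : ∀ k, InBox w h k → InBox w h (wrapE w k) := by
  intro k hk; obtain ⟨a, b, c, d⟩ := hk
  refine ⟨?_, ?_, c, d⟩ <;> simp only [wrapE] <;> split <;> omega
lemma wrapW_box (w h : Int) : ∀ k, InBox w h k → InBox w h (wrapW w k) := by
  intro k hk; obtain ⟨a, b, c, d⟩ := hk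
  refine ⟨?_, ?_, c, d⟩ <;> simp only [wrapW] <;> split <;> omega
lemma wrapW_wrapE (w h : Int) : ∀ k, InBox w h k → wrapW w (wrapE w k) = k := by
  intro k hk; obtain ⟨a, b, c, d⟩ := hk
  simp only [wrapE, wrapW]
  refine Prod.ext ?_ rfl
  dsimp only
  split_ifs <;> omega
lemma wrapE_wrapW (w h : Int) : ∀ k, InBox w h k → wrapE w (wrapW w k) = k := by
  intro k hk; obtain ⟨a, b, c, d⟩ := hk
  simp only [wrapE, wrapW]
  refine Prod.ext ?_ rfl
  dsimp only
  split_ifs <;> omega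
lemma wrapS_box (w h : Int) : ∀ k, InBox w h k → InBox w h (wrapS h k) := by
  intro k hk; obtain ⟨a, b, c, d⟩ := hk
  refine ⟨a, b, ?_, ?_⟩ <;> simp only [wrapS] <;> split <;> omega
lemma wrapN_box (w h : Int) : ∀ k, InBox w h k → InBox w h (wrapN h k) := by
  intro k hk; obtain ⟨a, b, c, d⟩ := hk
  refine ⟨a, b, ?_, ?_⟩ <;> simp only [wrapN] <;> split <;> omega
lemma wrapN_wrapS (w h : Int) : ∀ k, InBox w h k → wrapN h (wrapS h k) = k := by
  intro k hk; obtain ⟨a, b, c, d⟩ := hk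
  simp only [wrapS, wrapN]
  refine Prod.ext rfl ?_
  dsimp only
  split_ifs <;> omega
lemma wrapS_wrapN (w h : Int) : ∀ k, InBox w h k → wrapS h (wrapN h k) = k := by
  intro k hk; obtain ⟨a, b, c, d⟩ := hk
  simp only [wrapS, wrapN]
  refine Prod.ext rfl ?_
  dsimp only
  split_ifs <;> omega

-- A's phase folds are gphase instances
lemma stepEast_eq (width : Int) (last : Dct) :
    stepEast width last = fun t p => t.insert (gtgt '>' (wrapE width) last p) p.2 := by
  funext t p
  simp only [stepEast, gtgt, wrapE]
  by_cases h1 : p.2 = '>'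
  · by_cases h2 : last.contains (if p.1.1 + 1 ≥ width then p.1.1 + 1 - width else p.1.1 + 1, p.1.2) = false <;>
      simp [h1, h2]
  · simp [h1]

lemma stepSouth_eq (height : Int) (temp : Dct) :
    stepSouth height temp = fun t p => t.insert (gtgt 'v' (wrapS height) temp p) p.2 := by
  funext t p
  simp only [stepSouth, gtgt, wrapS]
  by_cases h1 : p.2 = 'v'
  · by_cases h2 : temp.contains (p.1.1, if p.1.2 + 1 ≥ height then p.1.2 + 1 - height else p.1.2 + 1) = false <;>
      simp [h1, h2]
  · simp [h1]

lemma eastPhase_eq (width : Int) (sm : Dct) :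
    sm.items.foldl (stepEast width sm) PySem.Dict.empty = gphase '>' (wrapE width) sm := by
  rw [stepEast_eq]; rfl

lemma southPhase_eq (height : Int) (temp : Dct) :
    temp.items.foldl (stepSouth height temp) PySem.Dict.empty = gphase 'v' (wrapS height) temp := by
  rw [stepSouth_eq]; rfl

-- ---------- grid lemmas ----------
lemma at2_table (h w : Nat) (f : Nat → Nat → Char) (y x : Nat) (hy : y < h) (hx : x < w) :
    at2 (table h w f) y x = f y x := by
  unfold at2 table
  simp only [List.getD_eq_getElem?_getD, List.getElem?_map, List.getElem?_range hy,
    List.getElem?_range hx, Option.map_some, Option.getD_some]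

lemma table_congr (h w : Nat) {f g : Nat → Nat → Char}
    (hfg : ∀ y < h, ∀ x < w, f y x = g y x) : table h w f = table h w g := by
  unfold table
  refine List.map_congr_left ?_
  intro y hy
  refine List.map_congr_left ?_
  intro x hx
  exact hfg y (List.mem_range.1 hy) x (List.mem_range.1 hx)

lemma table_inj (h w : Nat) {f g : Nat → Nat → Char} (he : table h w f = table h w g)
    (y x : Nat) (hy : y < h) (hx : x < w) : f y x = g y x := by
  have hcg := congrArg (fun t => at2 t y x) he
  simp only at hcg
  rwa [at2_table h w f y x hy hx, at2_table h w g y x hy hx] at hcg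

def rep (w h : Nat) (d : Dct) : List (List Char) :=
  table h w (fun y x => d.getD ((x : Int), (y : Int)) '.')

lemma succWrap (x w : Nat) (hx : x < w) : (x + 1) % w = if x + 1 = w then 0 else x + 1 := by
  split
  · simp_all [Nat.mod_self]
  · exact Nat.mod_eq_of_lt (by omega)

lemma predWrap (x w : Nat) (hx : x < w) : (x + w - 1) % w = if x = 0 then w - 1 else x - 1 := by
  split
  · next h0 =>
    subst h0
    simp only [Nat.zero_add]
    exact Nat.mod_eq_of_lt (by omega)
  · have h1 : x + w - 1 = (x - 1) + w := by omega
    rw [h1, Nat.add_mod_right]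
    exact Nat.mod_eq_of_lt (by omega)

lemma wrapE_cast (w : Nat) (x y : Nat) (hx : x < w) :
    wrapE (w : Int) ((x : Int), (y : Int)) = ((((x + 1) % w : Nat) : Int), (y : Int)) := by
  rw [succWrap x w hx]
  simp only [wrapE]
  refine Prod.ext ?_ rfl
  dsimp only
  split_ifs <;> push_cast <;> omega

lemma wrapW_cast (w : Nat) (x y : Nat) (hx : x < w) :
    wrapW (w : Int) ((x : Int), (y : Int)) = ((((x + w - 1) % w : Nat) : Int), (y : Int)) := by
  rw [predWrap x w hx]
  simp only [wrapW]
  refine Prod.ext ?_ rfl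
  dsimp only
  split_ifs <;> push_cast <;> omega

lemma wrapS_cast (h : Nat) (x y : Nat) (hy : y < h) :
    wrapS (h : Int) ((x : Int), (y : Int)) = ((x : Int), (((y + 1) % h : Nat) : Int)) := by
  rw [succWrap y h hy]
  simp only [wrapS]
  refine Prod.ext rfl ?_
  dsimp only
  split_ifs <;> omega

lemma wrapN_cast (h : Nat) (x y : Nat) (hy : y < h) :
    wrapN (h : Int) ((x : Int), (y : Int)) = ((x : Int), (((y + h - 1) % h : Nat) : Int)) := by
  rw [predWrap y h hy]
  simp only [wrapN]
  refine Prod.ext rfl ?_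
  dsimp only
  split_ifs <;> omega

lemma box_cast (w h : Nat) (x y : Nat) (hx : x < w) (hy : y < h) :
    InBox (w : Int) (h : Int) ((x : Int), (y : Int)) := by
  refine ⟨?_, ?_, ?_, ?_⟩ <;> simp <;> omega

lemma rep_east (w h : Nat) (d : Dct) (hinv : DInv (w : Int) (h : Int) d) :
    eastG h w (rep w h d) = rep w h (gphase '>' (wrapE (w : Int)) d) := by
  unfold eastG rep
  refine table_congr h w ?_
  intro y hy x hx
  have hw0 : 0 < w := by omega
  have hx1 : (x + 1) % w < w := Nat.mod_lt _ hw0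
  have hx2 : (x + w - 1) % w < w := Nat.mod_lt _ hw0
  rw [at2_table h w _ y x hy hx, at2_table h w _ y _ hy hx1, at2_table h w _ y _ hy hx2]
  rw [gphase_getD (w := (w : Int)) (h := (h : Int)) '>' (wrapE (w : Int)) (wrapW (w : Int)) d hinv
    (by decide) (wrapE_box _ _) (wrapW_box _ _) (wrapW_wrapE _ _) (wrapE_wrapW _ _)
    ((x : Int), (y : Int)) (box_cast w h x y hx hy)]
  rw [wrapE_cast w x y hx, wrapW_cast w x y hx]

lemma rep_south (w h : Nat) (d : Dct) (hinv : DInv (w : Int) (h : Int) d) :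
    southG h w (rep w h d) = rep w h (gphase 'v' (wrapS (h : Int)) d) := by
  unfold southG rep
  refine table_congr h w ?_
  intro y hy x hx
  have hh0 : 0 < h := by omega
  have hy1 : (y + 1) % h < h := Nat.mod_lt _ hh0
  have hy2 : (y + h - 1) % h < h := Nat.mod_lt _ hh0
  rw [at2_table h w _ y x hy hx, at2_table h w _ _ x hy1 hx, at2_table h w _ _ x hy2 hx]
  rw [gphase_getD (w := (w : Int)) (h := (h : Int)) 'v' (wrapS (h : Int)) (wrapN (h : Int)) d hinv
    (by decide) (wrapS_box _ _) (wrapN_box _ _) (wrapN_wrapS _ _) (wrapS_wrapN _ _)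
    ((x : Int), (y : Int)) (box_cast w h x y hx hy)]
  rw [wrapS_cast h x y hy, wrapN_cast h x y hy]

-- ---------- dict content equality vs grid equality ----------
lemma dictEqA_iff (d e : Dct) (hd : d.keys.Nodup) (he : e.keys.Nodup) :
    dictEqA d e = true ↔ ∀ k, d.get? k = e.get? k := by
  unfold dictEqA
  rw [Bool.and_eq_true, List.all_eq_true, List.all_eq_true]
  constructor
  · rintro ⟨h1, h2⟩ k
    cases hq : d.get? k with
    | some v =>
      have hb := h1 _ (PySem.Dict.mem_items_of_get?_eq_some _ hq)
      rw [beq_iff_eq] at hb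
      exact hb.symm
    | none =>
      cases hq2 : e.get? k with
      | none => rfl
      | some v =>
        have hb := h2 _ (PySem.Dict.mem_items_of_get?_eq_some _ hq2)
        rw [beq_iff_eq] at hb
        rw [hq] at hb; cases hb
  · intro hk
    constructor <;> intro p hp <;> rw [beq_iff_eq]
    · rw [← hk p.1]; exact PySem.Dict.get?_of_mem_items _ hp hd
    · rw [hk p.1]; exact PySem.Dict.get?_of_mem_items _ hp he

lemma get?_eq_of_getD_eq {w h : Int} {d e : Dct} (hd : DInv w h d) (he : DInv w h e)
    (k : Int × Int) (hgd : d.getD k '.' = e.getD k '.') : d.get? k = e.get? k := by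
  cases hq : d.get? k with
  | none =>
    have hdd : d.getD k '.' = '.' := (getD_dot_iff hd k).2 hq
    rw [hdd] at hgd
    rw [(getD_dot_iff he k).1 hgd.symm]
  | some v =>
    have hv2 : v = '>' ∨ v = 'v' := (hd.2 _ (PySem.Dict.mem_items_of_get?_eq_some _ hq)).2
    have hvne : v ≠ '.' := by rcases hv2 with h' | h' <;> rw [h'] <;> decide
    have hdd : d.getD k '.' = v := (getD_eq_iff_get? hvne).2 hq
    have hee : e.getD k '.' = v := by rw [← hgd]; exact hdd
    exact ((getD_eq_iff_get? hvne).1 hee).symm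

lemma dictEq_iff_rep (w h : Nat) (d e : Dct) (hd : DInv (w : Int) (h : Int) d)
    (he : DInv (w : Int) (h : Int) e) :
    dictEqA d e = true ↔ rep w h d = rep w h e := by
  rw [dictEqA_iff d e hd.1 he.1]
  constructor
  · intro hk
    unfold rep
    refine table_congr h w ?_
    intro y hy x hx
    rw [PySem.Dict.getD_eq_get?_getD, PySem.Dict.getD_eq_get?_getD, hk]
  · intro hr k
    by_cases hb : InBox (w : Int) (h : Int) k
    · obtain ⟨a, b, c, dd⟩ := hb
      have hx : k.1.toNat < w := by omega
      have hy : k.2.toNat < h := by omega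
      have hget := table_inj h w hr k.2.toNat k.1.toNat hy hx
      have hcast : ((k.1.toNat : Int), (k.2.toNat : Int)) = k := by
        refine Prod.ext ?_ ?_ <;> simp <;> omega
      rw [hcast] at hget
      exact get?_eq_of_getD_eq hd he k hget
    · rw [get?_none_of_not_box hd hb, get?_none_of_not_box he hb]

-- ---------- the main loop, in lockstep ----------
lemma loop_eq (w h : Nat) (fuel : Nat) :
    ∀ (step : Int) (sm last : Dct), DInv (w : Int) (h : Int) sm → DInv (w : Int) (h : Int) last →
      loopA (h : Int) (w : Int) fuel step sm last = loopB h w fuel step (rep w h sm) (rep w h last) := by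
  induction fuel with
  | zero => intro step sm last _ _; rfl
  | succ fuel ih =>
    intro step sm last hsm hlast
    simp only [loopA, loopB]
    by_cases hEq : dictEqA sm last = true
    · rw [if_pos hEq, if_pos ((dictEq_iff_rep w h sm last hsm hlast).1 hEq)]
    · rw [if_neg hEq, if_neg (fun hr => hEq ((dictEq_iff_rep w h sm last hsm hlast).2 hr))]
      have hinv1 : DInv (w : Int) (h : Int) (gphase '>' (wrapE (w : Int)) sm) :=
        gphase_inv '>' (wrapE (w : Int)) (wrapW (w : Int)) sm hsm (wrapE_box _ _) (wrapW_wrapE _ _)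
      have hinv2 : DInv (w : Int) (h : Int)
          (gphase 'v' (wrapS (h : Int)) (gphase '>' (wrapE (w : Int)) sm)) :=
        gphase_inv 'v' (wrapS (h : Int)) (wrapN (h : Int)) _ hinv1 (wrapS_box _ _) (wrapN_wrapS _ _)
      rw [eastPhase_eq (w : Int) sm, southPhase_eq (h : Int) (gphase '>' (wrapE (w : Int)) sm)]
      rw [ih (step + 1) _ sm hinv2 hsm]
      rw [rep_east w h sm hsm, rep_south w h _ hinv1]

-- ---------- the initial dict vs the initial grid ----------
lemma rowfold_ne (C : Int → Int → Char) (y : Int) (xs : List Int) (d : Dct) (q : Int × Int)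
    (hq : q.2 ≠ y) :
    (xs.foldl (fun d x => if C y x = '>' ∨ C y x = 'v' then d.insert (x, y) (C y x) else d) d).get? q
      = d.get? q := by
  induction xs generalizing d with
  | nil => rfl
  | cons x xs ih =>
    simp only [List.foldl_cons]
    rw [ih]
    split
    · refine PySem.Dict.get?_insert_of_ne d _ ?_
      intro hqe
      exact hq (by rw [hqe])
    · rfl

lemma rowfold_eq (C : Int → Int → Char) (y : Int) (xs : List Int) (d : Dct) (a : Int) :
    (xs.foldl (fun d x => if C y x = '>' ∨ C y x = 'v' then d.insert (x, y) (C y x) else d) d).get? (a, y)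
      = if a ∈ xs ∧ (C y a = '>' ∨ C y a = 'v') then some (C y a) else d.get? (a, y) := by
  induction xs generalizing d with
  | nil => simp
  | cons x xs ih =>
    simp only [List.foldl_cons]
    rw [ih]
    by_cases hax : a = x
    · subst hax
      by_cases hc : C y a = '>' ∨ C y a = 'v'
      · rw [if_pos hc]
        by_cases hmem : a ∈ xs
        · rw [if_pos ⟨hmem, hc⟩, if_pos ⟨List.mem_cons_self, hc⟩]
        · rw [if_neg (fun hcc => hmem hcc.1), if_pos ⟨List.mem_cons_self, hc⟩]
          exact PySem.Dict.get?_insert_self d (a, y) (C y a)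
      · rw [if_neg hc, if_neg (fun hcc => hc hcc.2), if_neg (fun hcc => hc hcc.2)]
    · have hmc : (a ∈ x :: xs ∧ (C y a = '>' ∨ C y a = 'v')) ↔
          (a ∈ xs ∧ (C y a = '>' ∨ C y a = 'v')) := by
        simp [List.mem_cons, hax]
      by_cases hrest : a ∈ xs ∧ (C y a = '>' ∨ C y a = 'v')
      · rw [if_pos hrest, if_pos (hmc.2 hrest)]
      · rw [if_neg hrest, if_neg (fun hcc => hrest (hmc.1 hcc))]
        split
        · refine PySem.Dict.get?_insert_of_ne d _ ?_
          intro hqe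
          exact hax (congrArg Prod.fst hqe)
        · rfl

lemma buildfold_get? (C : Int → Int → Char) (width : Int) (ys : List Int) (d : Dct) (q : Int × Int) :
    (ys.foldl (fun d y => (PySem.List.pyRange 0 width 1).foldl
        (fun d x => if C y x = '>' ∨ C y x = 'v' then d.insert (x, y) (C y x) else d) d) d).get? q
      = if q.2 ∈ ys ∧ (0 ≤ q.1 ∧ q.1 < width) ∧ (C q.2 q.1 = '>' ∨ C q.2 q.1 = 'v')
        then some (C q.2 q.1) else d.get? q := by
  obtain ⟨q1, q2⟩ := q
  induction ys generalizing d with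
  | nil => simp
  | cons y ys ih =>
    simp only [List.foldl_cons]
    rw [ih]
    by_cases hrest : q2 ∈ ys ∧ (0 ≤ q1 ∧ q1 < width) ∧ (C q2 q1 = '>' ∨ C q2 q1 = 'v')
    · rw [if_pos hrest, if_pos ⟨List.mem_cons_of_mem y hrest.1, hrest.2⟩]
    · rw [if_neg hrest]
      by_cases hqy : q2 = y
      · subst hqy
        rw [rowfold_eq C q2 _ d q1]
        have hmemiff : (q1 ∈ PySem.List.pyRange 0 width 1 ∧ (C q2 q1 = '>' ∨ C q2 q1 = 'v')) ↔
            ((0 ≤ q1 ∧ q1 < width) ∧ (C q2 q1 = '>' ∨ C q2 q1 = 'v')) := by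
          rw [PySem.List.mem_pyRange_one]
        by_cases hcond : (0 ≤ q1 ∧ q1 < width) ∧ (C q2 q1 = '>' ∨ C q2 q1 = 'v')
        · rw [if_pos (hmemiff.2 hcond), if_pos ⟨List.mem_cons_self, hcond.1, hcond.2⟩]
        · rw [if_neg (fun hcc => hcond (hmemiff.1 hcc)),
            if_neg (fun hcc => hcond ⟨hcc.2.1, hcc.2.2⟩)]
      · rw [rowfold_ne C y _ d (q1, q2) hqy]
        have hmc : ((q1, q2).2 ∈ y :: ys ∧ (0 ≤ q1 ∧ q1 < width) ∧ (C q2 q1 = '>' ∨ C q2 q1 = 'v')) ↔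
            (q2 ∈ ys ∧ (0 ≤ q1 ∧ q1 < width) ∧ (C q2 q1 = '>' ∨ C q2 q1 = 'v')) := by
          simp [List.mem_cons, hqy]
        rw [if_neg (fun hcc => hrest (hmc.1 hcc))]

lemma foldl_nodup {α : Type} (step : Dct → α → Dct)
    (hstep : ∀ d a, d.keys.Nodup → (step d a).keys.Nodup) (xs : List α) :
    ∀ d : Dct, d.keys.Nodup → (xs.foldl step d).keys.Nodup := by
  induction xs with
  | nil => intro d hd; exact hd
  | cons x xs ih => intro d hd; exact ih (step d x) (hstep d x hd)

-- ---------- the initial dict: characterization, invariant, representation ----------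
def buildT (input : List String) : Dct :=
  (PySem.List.pyRange 0 (input.length : Int) 1).foldl (fun d y =>
    (PySem.List.pyRange 0 (((PySem.Str.len (input.headD "")).toNat : Nat) : Int) 1).foldl (fun d x =>
      if chA input y x = '>' ∨ chA input y x = 'v' then d.insert (x, y) (chA input y x) else d) d)
    PySem.Dict.empty

lemma buildT_get? (input : List String) (q : Int × Int) :
    (buildT input).get? q =
      if (0 ≤ q.2 ∧ q.2 < (input.length : Int)) ∧
          (0 ≤ q.1 ∧ q.1 < (((PySem.Str.len (input.headD "")).toNat : Nat) : Int)) ∧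
          (chA input q.2 q.1 = '>' ∨ chA input q.2 q.1 = 'v')
        then some (chA input q.2 q.1) else none := by
  unfold buildT
  rw [buildfold_get? (chA input) _ _ _ q]
  all_goals simp only [PySem.List.mem_pyRange_one, PySem.Dict.get?_empty]

lemma buildT_nodup (input : List String) : (buildT input).keys.Nodup := by
  unfold buildT
  refine foldl_nodup _ ?_ _ _ ?_
  · intro d y hd
    refine foldl_nodup _ ?_ _ _ hd
    intro d2 x hd2
    split
    · exact PySem.Dict.nodup_keys_insert _ _ _ hd2
    · exact hd2
  · have hk : (PySem.Dict.empty : Dct).keys = [] := rfl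
    rw [hk]; exact List.nodup_nil

lemma buildT_inv (input : List String) :
    DInv (((PySem.Str.len (input.headD "")).toNat : Nat) : Int) ((input.length : Nat) : Int) (buildT input) := by
  refine ⟨buildT_nodup input, ?_⟩
  intro p hp
  have hg : (buildT input).get? p.1 = some p.2 :=
    PySem.Dict.get?_of_mem_items _ hp (buildT_nodup input)
  rw [buildT_get?] at hg
  split_ifs at hg with hcond
  · obtain ⟨hy, hx, hcuc⟩ := hcond
    refine ⟨⟨hx.1, hx.2, hy.1, hy.2⟩, ?_⟩
    have hv : p.2 = chA input p.1.2 p.1.1 := (Option.some.inj hg).symm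
    rw [hv]; exact hcuc

lemma empty_inv (w h : Int) : DInv w h (PySem.Dict.empty : Dct) := by
  constructor
  · have hk : (PySem.Dict.empty : Dct).keys = [] := rfl
    rw [hk]; exact List.nodup_nil
  · intro p hp
    have hi : (PySem.Dict.empty : Dct).items = [] := rfl
    rw [hi] at hp; cases hp

lemma rep_empty (w h : Nat) : rep w h (PySem.Dict.empty : Dct) = table h w (fun _ _ => '.') := by
  unfold rep
  refine table_congr h w ?_
  intro y _ x _
  simp [PySem.Dict.getD_empty]

lemma chA_eq_cell (input : List String) (y x : Nat) (hy : y < input.length) :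
    chA input (y : Int) (x : Int) = (PySem.Str.pyGet? (input.getD y "") ((x : Nat) : Int)).getD ' ' := by
  unfold chA
  rw [PySem.List.pyGet?_natCast, List.getElem?_eq_getElem hy]
  simp only [Option.bind_some]
  have h1 : input.getD y "" = input[y] := by
    rw [List.getD_eq_getElem?_getD, List.getElem?_eq_getElem hy]; rfl
  rw [h1]

lemma rep_buildT (input : List String) :
    rep ((PySem.Str.len (input.headD "")).toNat) (input.length) (buildT input)
      = table (input.length) ((PySem.Str.len (input.headD "")).toNat) (cellB input) := by
  unfold rep
  refine table_congr _ _ ?_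
  intro y hy x hx
  rw [PySem.Dict.getD_eq_get?_getD, buildT_get?]
  have hyI : (0 ≤ (y : Int) ∧ (y : Int) < (input.length : Int)) := by omega
  have hxI : (0 ≤ (x : Int) ∧ (x : Int) < (((PySem.Str.len (input.headD "")).toNat : Nat) : Int)) := by omega
  have hch := chA_eq_cell input y x hy
  by_cases hcuc : chA input (y : Int) (x : Int) = '>' ∨ chA input (y : Int) (x : Int) = 'v'
  · rw [if_pos ⟨hyI, hxI, hcuc⟩]
    simp only [Option.getD_some]
    simp only [cellB]
    rw [← hch, if_pos hcuc]
  · rw [if_neg (fun hcc => hcuc hcc.2.2)]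
    simp only [Option.getD_none]
    simp only [cellB]
    rw [← hch, if_neg hcuc]

-- ===== VERDICT (by name: the statement is the Claim_ definition above) =====
theorem part1_spec : Claim_equal_part1 := by
  intro input hdom hpre
  unfold Spec_part1
  obtain ⟨hne, _⟩ := hpre
  have hwidth : PySem.Str.len ((PySem.List.pyGet? input 0).getD "")
      = (((PySem.Str.len (input.headD "")).toNat : Nat) : Int) := by
    cases input with
    | nil => exact absurd rfl hne
    | cons s t =>
      simp only [PySem.List.pyGet?_zero_cons, Option.getD_some, List.headD_cons]
      simp only [PySem.Str.len_eq]
      omega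
  simp only [part1, part1_alt]
  rw [hwidth]
  simp only [Int.toNat_natCast]
  have h3 := loop_eq ((PySem.Str.len (input.headD "")).toNat) (input.length)
    (3 ^ (input.length * (PySem.Str.len (input.headD "")).toNat) + 1) 0 (buildT input) PySem.Dict.empty
    (buildT_inv input) (empty_inv _ _)
  rw [rep_buildT input, rep_empty] at h3
  exact h3
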